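-- pv_equiv track=rewrite | github.com/rbose99/CodeSignal-Problems | Arcade Intro/8. matrixElementsSum.py | solution
-- ===== SOURCE A (Python) =====
-- def solution(matrix):
--     cost=0
--     for i in range(len(matrix)):
--         for j in range(len(matrix[0])):
--             if i==0 or matrix[i-1][j]!=0:
--                 cost+=matrix[i][j]
--             else:
--                 matrix[i][j]=0
--     return cost
-- ===== SOURCE B (Python) =====
-- def solution(matrix):
--     # Column-major scan: for each column, add entries top-down and stop at the
--     # first zero (A instead propagates zeros downward by mutating the matrix).
--     # Unlike A, this does not mutate `matrix`; the return value is identical.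
--     if not matrix:
--         return 0
--     total = 0
--     for j in range(len(matrix[0])):
--         for row in matrix:
--             v = row[j]
--             if v == 0:
--                 break
--             total += v
--     return total
-- ===== Notes on version B (the rewrite author's own statement) =====
-- stated objective: simpler
-- what changed: Replaces A's row-major pass that mutates the matrix to propagate zeros downward with a non-mutating column-major scan that sums each column top-down and breaks at the first zero.
import Mathlib
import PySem

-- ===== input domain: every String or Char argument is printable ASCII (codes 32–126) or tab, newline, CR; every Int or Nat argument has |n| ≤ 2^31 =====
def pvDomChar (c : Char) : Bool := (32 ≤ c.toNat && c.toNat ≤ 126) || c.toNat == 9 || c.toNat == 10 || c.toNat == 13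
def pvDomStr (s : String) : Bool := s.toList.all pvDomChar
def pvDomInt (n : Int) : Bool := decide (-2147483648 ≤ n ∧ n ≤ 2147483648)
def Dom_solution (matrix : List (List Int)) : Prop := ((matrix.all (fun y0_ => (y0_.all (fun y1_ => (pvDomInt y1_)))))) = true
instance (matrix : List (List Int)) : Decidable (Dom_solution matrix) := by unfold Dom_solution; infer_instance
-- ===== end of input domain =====

-- B replaces A's mutating row-major pass by a simpler non-mutating column-major
-- scan that breaks at the first zero; A mutates `matrix` in place (zeros
-- propagated down), B does not — the equivalence proved is about the return value.


-- ===== PORT A =====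
-- literal port of A; the in-place writes matrix[i][j]=0 are threaded through the
-- fold state; pyGetD/pySetD are exact here because Pre_solution keeps every index in range
def solution (matrix : List (List Int)) : Int :=
  ((PySem.List.pyRange 0 (matrix.length : Int) 1).foldl (fun (st : Int × List (List Int)) i =>
    (PySem.List.pyRange 0 ((PySem.List.pyGetD st.2 0 []).length : Int) 1).foldl
      (fun (st : Int × List (List Int)) j =>
        if i = 0 ∨ PySem.List.pyGetD (PySem.List.pyGetD st.2 (i-1) []) j 0 ≠ 0 then
          (st.1 + PySem.List.pyGetD (PySem.List.pyGetD st.2 i []) j 0, st.2)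
        else
          (st.1, PySem.List.pySetD st.2 i (PySem.List.pySetD (PySem.List.pyGetD st.2 i []) j 0)))
      st) (0, matrix)).1

-- ===== PORT B =====
-- inner `for row in matrix: … break` loop of Source B, threading the accumulator `total`
def colScan (rows : List (List Int)) (j total : Int) : Int :=
  match rows with
  | [] => total
  | row :: rest =>
    let v := PySem.List.pyGetD row j 0
    if v = 0 then total else colScan rest j (total + v)

def solution_alt (matrix : List (List Int)) : Int :=
  match matrix with
  | [] => 0
  | r0 :: _ =>
    (PySem.List.pyRange 0 (r0.length : Int) 1).foldl (fun total j => colScan matrix j total) 0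

-- ===== PRECONDITION & SPEC =====
-- Pre_ excludes exactly the ragged matrices whose first row is longer than some later
-- row: there both Pythons raise IndexError (A on matrix[i-1][j] / matrix[i][j]).
def Pre_solution (matrix : List (List Int)) : Prop :=
  ∀ row ∈ matrix, (matrix.headD []).length ≤ row.length
instance (matrix : List (List Int)) : Decidable (Pre_solution matrix) := by
  unfold Pre_solution; infer_instance
def pvWitness_solution : List (List Int) := [[1, 2], [0, 3], [4, 5]]
def Spec_solution (matrix : List (List Int)) (out : Int) : Prop := out = solution_alt matrix
instance (matrix : List (List Int)) (out : Int) : Decidable (Spec_solution matrix out) := by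
  unfold Spec_solution; infer_instance

-- ===== CLAIM (what is proved, stated in full; the proofs are below) =====
def Claim_equal_solution : Prop := ∀ (matrix : List (List Int)), Dom_solution matrix → Pre_solution matrix → Spec_solution matrix (solution matrix)

-- ===== LEMMAS AND PROOFS =====

-- entry (k,j) of M, 0-defaulted
def geta (M : List (List Int)) (k j : Nat) : Int := (M.getD k []).getD j 0

-- "no zero in column j strictly above row i"
def noZ (M : List (List Int)) (j i : Nat) : Bool := decide (∀ k < i, geta M k j ≠ 0)

-- the matrix after A has processed rows < t fully and row t up to column s
def mst (M : List (List Int)) (c t s : Nat) : List (List Int) :=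
  M.mapIdx (fun k row =>
    row.mapIdx (fun j v =>
      if ((k < t ∧ j < c) ∨ (k = t ∧ j < s)) ∧ ¬ noZ M j k then 0 else v))

theorem length_mst (M : List (List Int)) (c t s : Nat) : (mst M c t s).length = M.length := by
  simp [mst]

theorem getElem_mst (M : List (List Int)) (c t s k : Nat) (hk : k < M.length)
    (j : Nat) (hj : j < (M[k]).length) :
    ((mst M c t s)[k]'(by simpa [length_mst] using hk))[j]'(by simp [mst]; exact hj) =
      if ((k < t ∧ j < c) ∨ (k = t ∧ j < s)) ∧ ¬ noZ M j k then 0 else geta M k j := by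
  have h1 : M[k]? = some M[k] := List.getElem?_eq_getElem hk
  have h2 : (M[k])[j]? = some ((M[k])[j]) := List.getElem?_eq_getElem hj
  simp [mst, geta, List.getD_eq_getElem?_getD, h1, h2]

theorem geta_mst (M : List (List Int)) (c t s k : Nat) (hk : k < M.length)
    (j : Nat) (hj : j < (M[k]).length) :
    geta (mst M c t s) k j =
      if ((k < t ∧ j < c) ∨ (k = t ∧ j < s)) ∧ ¬ noZ M j k then 0 else geta M k j := by
  have hk' : k < (mst M c t s).length := by simpa [length_mst] using hk
  have hj' : j < ((mst M c t s)[k]).length := by simp [mst]; exact hj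
  rw [geta, List.getD_eq_getElem _ _ hk', List.getD_eq_getElem _ _ hj']
  exact getElem_mst M c t s k hk j hj

-- A's loop bodies, named so the fold lemmas can speak about them
def stepB (i : Int) (st : Int × List (List Int)) (j : Int) : Int × List (List Int) :=
  if i = 0 ∨ PySem.List.pyGetD (PySem.List.pyGetD st.2 (i-1) []) j 0 ≠ 0 then
    (st.1 + PySem.List.pyGetD (PySem.List.pyGetD st.2 i []) j 0, st.2)
  else
    (st.1, PySem.List.pySetD st.2 i (PySem.List.pySetD (PySem.List.pyGetD st.2 i []) j 0))

def outerB (st : Int × List (List Int)) (i : Int) : Int × List (List Int) :=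
  (PySem.List.pyRange 0 ((PySem.List.pyGetD st.2 0 []).length : Int) 1).foldl (stepB i) st

theorem solution_eq_fold (M : List (List Int)) :
    solution M = ((PySem.List.pyRange 0 (M.length : Int) 1).foldl outerB (0, M)).1 := rfl

theorem row_len (M : List (List Int)) (c : Nat) (hc : ∀ row ∈ M, c ≤ row.length)
    (k : Nat) (hk : k < M.length) (j : Nat) (hj : j < c) : j < (M[k]).length :=
  lt_of_lt_of_le hj (hc _ (List.getElem_mem hk))

theorem mst_zero (M : List (List Int)) (c : Nat) : mst M c 0 0 = M := by
  apply List.ext_getElem (by simp [length_mst])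
  intro k h1 h2
  apply List.ext_getElem (by simp [mst])
  intro j h3 h4
  rw [getElem_mst M c 0 0 k h2 j h4]
  have e1 : M[k]? = some M[k] := List.getElem?_eq_getElem h2
  have e2 : (M[k])[j]? = some ((M[k])[j]) := List.getElem?_eq_getElem h4
  simp [geta, List.getD_eq_getElem?_getD, e1, e2]

theorem mst_roll (M : List (List Int)) (c t : Nat) : mst M c t c = mst M c (t+1) 0 := by
  apply List.ext_getElem (by simp [length_mst])
  intro k h1 h2
  have hk : k < M.length := by simpa [length_mst] using h1
  apply List.ext_getElem (by simp [mst])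
  intro j h3 h4
  have hj : j < (M[k]).length := by
    simpa [mst] using (by simpa [mst] using h3 : j < ((mst M c t c)[k]).length)
  rw [getElem_mst M c t c k hk j hj, getElem_mst M c (t+1) 0 k hk j hj]
  congr 2
  exact propext (by omega)

theorem len_row_mst (M : List (List Int)) (c t s k : Nat) (hk : k < M.length) :
    ((mst M c t s)[k]'(by rw [length_mst]; exact hk)).length = (M[k]).length := by
  simp [mst]

theorem noZ_succ (M : List (List Int)) (j t : Nat) :
    noZ M j (t+1) = (noZ M j t && decide (geta M t j ≠ 0)) := by
  simp only [noZ, ← Bool.decide_and, decide_eq_decide]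
  constructor
  · intro h; exact ⟨fun k hk => h k (by omega), h t (by omega)⟩
  · rintro ⟨h1, h2⟩ k hk
    rcases Nat.lt_succ_iff_lt_or_eq.1 hk with h | h
    · exact h1 k h
    · exact h ▸ h2

theorem mst_succ_of_noZ (M : List (List Int)) (c t s : Nat) (h : noZ M s t = true) :
    mst M c t (s+1) = mst M c t s := by
  apply List.ext_getElem (by simp [length_mst])
  intro k h1 h2
  have hk : k < M.length := by simpa [length_mst] using h1
  apply List.ext_getElem (by simp [mst])
  intro j h3 h4
  have hj : j < (M[k]).length := by
    simpa [mst] using (by simpa [mst] using h3 : j < ((mst M c t (s+1))[k]).length)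
  rw [getElem_mst M c t (s+1) k hk j hj, getElem_mst M c t s k hk j hj]
  by_cases hkt : k = t
  · subst hkt
    by_cases hjs : j = s
    · subst hjs; simp [h]
    · congr 2; exact propext (by omega)
  · congr 2; exact propext (by omega)

theorem mst_succ_of_set (M : List (List Int)) (c : Nat) (t s : Nat)
    (ht : t < M.length) (h : noZ M s t = false) :
    (mst M c t s).set t (((mst M c t s).getD t []).set s 0) = mst M c t (s+1) := by
  have ht' : t < (mst M c t s).length := by rw [length_mst]; exact ht
  have hrow : (mst M c t s).getD t [] = (mst M c t s)[t]'ht' := List.getD_eq_getElem _ _ ht'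
  rw [hrow]
  apply List.ext_getElem
  · rw [List.length_set, length_mst, length_mst]
  intro k h1 h2
  have hk : k < M.length := by rw [length_mst] at h2; exact h2
  rw [List.getElem_set]
  by_cases hkt : k = t
  · subst hkt
    rw [if_pos rfl]
    apply List.ext_getElem
    · rw [List.length_set, len_row_mst M c k s k hk, len_row_mst M c k (s+1) k hk]
    intro j h3 h4
    have hj : j < (M[k]).length := by rw [len_row_mst] at h4; exact h4
    rw [List.getElem_set, getElem_mst M c k (s+1) k hk j hj]
    by_cases hjs : j = s
    · subst hjs
      rw [if_pos rfl, if_pos ⟨Or.inr ⟨rfl, by omega⟩, by simp [h]⟩]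
    · rw [if_neg (fun hh => hjs hh.symm), getElem_mst M c k s k hk j hj]
      congr 2; exact propext (by omega)
  · rw [if_neg (fun hh => hkt hh.symm)]
    apply List.ext_getElem
    · rw [len_row_mst M c t s k hk, len_row_mst M c t (s+1) k hk]
    intro j h3 h4
    have hj : j < (M[k]).length := by rw [len_row_mst] at h4; exact h4
    rw [getElem_mst M c t s k hk j hj, getElem_mst M c t (s+1) k hk j hj]
    congr 2; exact propext (by omega)

theorem innerFold (M : List (List Int)) (c : Nat) (hc : ∀ row ∈ M, c ≤ row.length)
    (t : Nat) (ht : t < M.length) (s : Nat) (hs : s ≤ c) (cost : Int) :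
    (PySem.List.pyRange 0 (s : Int) 1).foldl (stepB (t : Int)) (cost, mst M c t 0)
      = (cost + ∑ j ∈ Finset.range s, (if noZ M j t then geta M t j else 0), mst M c t s) := by
  induction s with
  | zero => simp [PySem.List.pyRange_one_eq_nil]
  | succ s ih =>
    have hss : s < c := by omega
    have hcast : ((s + 1 : Nat) : Int) = (s : Int) + 1 := by push_cast; ring
    rw [hcast, PySem.List.pyRange_one_succ_right (by positivity), List.foldl_append,
      ih (by omega)]
    simp only [List.foldl_cons, List.foldl_nil]
    have hrow : s < (M[t]).length := row_len M c hc t ht s hss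
    rcases Bool.eq_false_or_eq_true (noZ M s t) with hnz | hnz
    · -- column open: A adds the entry
      have hguard : ((t : Int) = 0 ∨
          PySem.List.pyGetD (PySem.List.pyGetD (mst M c t s) ((t : Int) - 1) []) (s : Int) 0 ≠ 0) := by
        cases t with
        | zero => exact Or.inl rfl
        | succ t' =>
          right
          have h1 : ((t' + 1 : Nat) : Int) - 1 = ((t' : Nat) : Int) := by push_cast; ring
          have ht'M : t' < M.length := by omega
          have hrow' : s < (M[t']).length := row_len M c hc t' ht'M s hss
          rw [h1, PySem.List.pyGetD_natCast, PySem.List.pyGetD_natCast]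
          show geta (mst M c (t'+1) s) t' s ≠ 0
          rw [geta_mst M c (t'+1) s t' ht'M s hrow']
          rw [noZ_succ] at hnz
          simp only [Bool.and_eq_true, decide_eq_true_eq] at hnz
          rw [if_neg (fun hh => hh.2 hnz.1)]
          exact hnz.2
      rw [stepB, if_pos hguard]
      have hvt : PySem.List.pyGetD (PySem.List.pyGetD (mst M c t s) (t : Int) []) (s : Int) 0
          = geta M t s := by
        rw [PySem.List.pyGetD_natCast, PySem.List.pyGetD_natCast]
        show geta (mst M c t s) t s = geta M t s
        rw [geta_mst M c t s t ht s hrow]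
        rw [if_neg (by rintro ⟨(⟨hlt, _⟩ | ⟨_, hlt⟩), _⟩ <;> omega)]
      rw [hvt, Finset.sum_range_succ, hnz, if_pos rfl, mst_succ_of_noZ M c t s hnz]
      simp only [Prod.mk.injEq, and_true]
      ring

    · -- column blocked: A writes a 0 instead of adding
      have hne : (t : Int) ≠ 0 := by
        intro h0
        have ht0 : t = 0 := by exact_mod_cast h0
        subst ht0
        have hz0 : noZ M s 0 = true := decide_eq_true (fun k hk => absurd hk (Nat.not_lt_zero k))
        rw [hz0] at hnz
        exact absurd hnz (by decide)
      obtain ⟨t', rfl⟩ : ∃ t', t = t' + 1 := by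
        cases t with
        | zero => exact absurd rfl (by exact_mod_cast hne)
        | succ t' => exact ⟨t', rfl⟩
      have ht'M : t' < M.length := by omega
      have hrow' : s < (M[t']).length := row_len M c hc t' ht'M s hss
      have hval : PySem.List.pyGetD (PySem.List.pyGetD (mst M c (t'+1) s) (((t'+1 : Nat) : Int) - 1) []) (s : Int) 0 = 0 := by
        have h1 : ((t' + 1 : Nat) : Int) - 1 = ((t' : Nat) : Int) := by push_cast; ring
        rw [h1, PySem.List.pyGetD_natCast, PySem.List.pyGetD_natCast]
        show geta (mst M c (t'+1) s) t' s = 0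
        rw [geta_mst M c (t'+1) s t' ht'M s hrow']
        rw [noZ_succ] at hnz
        rcases Bool.eq_false_or_eq_true (noZ M s t') with h2 | h2
        · rw [h2] at hnz
          simp only [Bool.true_and, decide_eq_false_iff_not, not_not] at hnz
          rw [if_neg (fun hh => hh.2 h2)]
          exact hnz
        · rw [if_pos ⟨Or.inl ⟨by omega, hss⟩, by simp [h2]⟩]
      rw [stepB, if_neg (not_or.mpr ⟨hne, not_not_intro hval⟩)]
      rw [PySem.List.pyGetD_natCast]
      simp only [PySem.List.pySetD_natCast]
      rw [mst_succ_of_set M c (t'+1) s ht hnz]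
      rw [Finset.sum_range_succ, hnz]
      simp
theorem row0_len_mst (M : List (List Int)) (c t s : Nat) (h0 : 0 < M.length) :
    ((PySem.List.pyGetD (mst M c t s) 0 []).length : Int) = ((M.getD 0 []).length : Int) := by
  rw [PySem.List.pyGetD_zero]
  rw [List.getD_eq_getElem _ _ (by rw [length_mst]; exact h0), len_row_mst M c t s 0 h0,
    List.getD_eq_getElem _ _ h0]

theorem outerFold (M : List (List Int)) (c : Nat) (hM0 : (M.getD 0 []).length = c)
    (hc : ∀ row ∈ M, c ≤ row.length) (t : Nat) (ht : t ≤ M.length) :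
    (PySem.List.pyRange 0 (t : Int) 1).foldl outerB (0, M)
      = (∑ i ∈ Finset.range t, ∑ j ∈ Finset.range c, (if noZ M j i then geta M i j else 0),
          mst M c t 0) := by
  induction t with
  | zero =>
    simp only [Nat.cast_zero]
    rw [PySem.List.pyRange_one_eq_nil le_rfl]
    simp [mst_zero]
  | succ t ih =>
    have htM : t < M.length := by omega
    have hcast : ((t + 1 : Nat) : Int) = (t : Int) + 1 := by push_cast; ring
    rw [hcast, PySem.List.pyRange_one_succ_right (by positivity), List.foldl_append,
      ih (by omega)]
    simp only [List.foldl_cons, List.foldl_nil]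
    rw [outerB]
    rw [show ((PySem.List.pyGetD (mst M c t 0) 0 []).length : Int) = ((c : Nat) : Int) by
      rw [row0_len_mst M c t 0 (by omega), hM0]]
    rw [innerFold M c hc t htM c le_rfl]
    rw [mst_roll, Finset.sum_range_succ]

-- ---- B side ----
def csum : List (List Int) → Nat → Int
  | [], _ => 0
  | row :: rest, j => if row.getD j 0 = 0 then 0 else row.getD j 0 + csum rest j

theorem colScan_eq (rows : List (List Int)) (j : Nat) (total : Int) :
    colScan rows (j : Int) total = total + csum rows j := by
  induction rows generalizing total with
  | nil => simp [colScan, csum]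
  | cons row rest ih =>
    simp only [colScan, csum, PySem.List.pyGetD_natCast]
    split_ifs with h
    · simp
    · rw [ih]; ring

theorem altFold (M : List (List Int)) (s : Nat) (total : Int) :
    (PySem.List.pyRange 0 (s : Int) 1).foldl (fun total j => colScan M j total) total
      = total + ∑ j ∈ Finset.range s, csum M j := by
  induction s generalizing total with
  | zero => simp [PySem.List.pyRange_one_eq_nil]
  | succ s ih =>
    have hcast : ((s + 1 : Nat) : Int) = (s : Int) + 1 := by push_cast; ring
    rw [hcast, PySem.List.pyRange_one_succ_right (by positivity), List.foldl_append, ih]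
    simp only [List.foldl_cons, List.foldl_nil]
    rw [colScan_eq, Finset.sum_range_succ]
    ring

theorem col_eq (M : List (List Int)) (j : Nat) :
    ∑ i ∈ Finset.range M.length, (if noZ M j i then geta M i j else 0) = csum M j := by
  induction M with
  | nil => simp [csum]
  | cons row rest ih =>
    rw [List.length_cons, Finset.sum_range_succ']
    have f0 : (if noZ (row::rest) j 0 then geta (row::rest) 0 j else 0) = row.getD j 0 := by
      simp [noZ, geta]
    have fs : ∀ i, (if noZ (row::rest) j (i+1) then geta (row::rest) (i+1) j else 0)
        = (if row.getD j 0 = 0 then 0 else (if noZ rest j i then geta rest i j else 0)) := by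
      intro i
      have hn : noZ (row::rest) j (i+1) = (decide (¬ row.getD j 0 = 0) && noZ rest j i) := by
        simp only [noZ, ← Bool.decide_and, decide_eq_decide]
        constructor
        · intro h
          refine ⟨fun hz => h 0 (by omega) (by simpa [geta] using hz), fun k hk => ?_⟩
          have := h (k+1) (by omega)
          simpa [geta] using this
        · rintro ⟨h1, h2⟩ k hk
          cases k with
          | zero => intro hz; exact h1 (by simpa [geta] using hz)
          | succ k' =>
            have := h2 k' (by omega)
            simpa [geta] using this
      have hg : geta (row::rest) (i+1) j = geta rest i j := by simp [geta]
      rw [hn]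
      by_cases hz : row.getD j 0 = 0
      · have hz' : row[j]?.getD 0 = 0 := hz
        simp [hz']
      · have hz' : ¬ row[j]?.getD 0 = 0 := hz
        simp [hz', hg]
    by_cases hz : row.getD j 0 = 0
    · simp only [csum, if_pos hz]
      rw [Finset.sum_congr rfl (fun i _ => fs i), f0, hz]
      simp
    · rw [Finset.sum_congr rfl (fun i _ => fs i), f0]
      simp only [csum, if_neg hz]
      rw [ih]
      ring

-- ===== VERDICT (by name: the statement is the Claim_ definition above) =====
theorem solution_spec : Claim_equal_solution := by
  intro M _ hpre
  show solution M = solution_alt M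
  cases M with
  | nil => decide
  | cons r0 rest =>
    have hM0 : (((r0 :: rest) : List (List Int)).getD 0 []).length = r0.length := rfl
    have hc : ∀ row ∈ (r0 :: rest), r0.length ≤ row.length := by
      intro row hr
      exact hpre row hr
    rw [solution_eq_fold, outerFold (r0 :: rest) r0.length hM0 hc _ le_rfl]
    show _ = (PySem.List.pyRange 0 (r0.length : Int) 1).foldl
      (fun total j => colScan (r0 :: rest) j total) 0
    rw [altFold, Finset.sum_comm]
    simp only [zero_add]
    exact Finset.sum_congr rfl (fun j _ => col_eq (r0 :: rest) j)
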